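-- pv_equiv track=rewrite | github.com/imtn/imtn-AdventOfCode | 2015/day05/day5.py | newIsNiceOrNaughty
-- ===== SOURCE A (Python) =====
-- def newIsNiceOrNaughty(s):
-- 	containsDoublePairs = False
-- 	for i in range(len(s)-2):
-- 		pair = s[i:i+2]
-- 		for j in range(i+2,len(s)):
-- 			if pair == s[j:j+2]:
-- 				containsDoublePairs = True
-- 	if not containsDoublePairs:
-- 		return False
--
-- 	for i in range(len(s)-2):
-- 		if s[i] == s[i+2]:
-- 			return True
-- 	return False
-- ===== SOURCE B (Python) =====
-- def newIsNiceOrNaughty(s):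
--     first = {}
--     has_pair = False
--     for i in range(len(s) - 1):
--         p = s[i:i + 2]
--         if p in first:
--             if first[p] + 2 <= i:
--                 has_pair = True
--                 break
--         else:
--             first[p] = i
--     if not has_pair:
--         return False
--     return any(s[i] == s[i + 2] for i in range(len(s) - 2))
-- ===== Notes on version B (the rewrite author's own statement) =====
-- stated objective: faster
-- what changed: The quadratic all-pairs double scan is replaced by a single pass that hashes each 2-char pair to its first index and flags a repeat as soon as a pair recurs at distance >= 2; the sandwich check becomes a short-circuiting any().
import Mathlib
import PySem

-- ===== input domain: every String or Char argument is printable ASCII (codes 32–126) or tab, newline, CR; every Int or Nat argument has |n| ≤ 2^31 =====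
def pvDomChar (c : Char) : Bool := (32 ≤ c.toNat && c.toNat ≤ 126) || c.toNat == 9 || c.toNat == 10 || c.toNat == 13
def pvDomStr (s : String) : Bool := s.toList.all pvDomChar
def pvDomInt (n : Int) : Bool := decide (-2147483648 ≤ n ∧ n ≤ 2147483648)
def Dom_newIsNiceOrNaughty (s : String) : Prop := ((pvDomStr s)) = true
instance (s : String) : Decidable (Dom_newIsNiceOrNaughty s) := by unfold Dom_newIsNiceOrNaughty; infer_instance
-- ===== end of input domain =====

-- B replaces A's quadratic all-pairs scan by a single pass hashing each 2-char pair to its first index.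

-- ===== PORT A =====
-- literal port of A: nested index ranges setting a flag, then an early-return sandwich loop (early return = any)
def newIsNiceOrNaughty (s : String) : Bool :=
  let l := s.toList
  let n : Int := l.length
  let containsDoublePairs : Bool :=
    (PySem.List.pyRange 0 (n - 2) 1).foldl (fun acc i =>
      let pair := PySem.List.slice l (some i) (some (i + 2))
      (PySem.List.pyRange (i + 2) n 1).foldl (fun acc2 j =>
        if pair = PySem.List.slice l (some j) (some (j + 2)) then true else acc2) acc) false
  if !containsDoublePairs then false
  else
    (PySem.List.pyRange 0 (n - 2) 1).any (fun i =>
      PySem.List.pyGetD l i ' ' == PySem.List.pyGetD l (i + 2) ' ')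

-- ===== PORT B =====
-- Source B's loop with break: first-occurrence dict of each 2-char pair; true when a pair recurs at distance ≥ 2
def pvScan (l : List Char) : List Nat → PySem.Dict (List Char) Nat → Bool
  | [], _ => false
  | i :: rest, first =>
    let p := (l.drop i).take 2
    match first.get? p with
    | some f => if f + 2 ≤ i then true else pvScan l rest first
    | none => pvScan l rest (first.insert p i)

def newIsNiceOrNaughty_alt (s : String) : Bool :=
  let l := s.toList
  if pvScan l (List.range (l.length - 1)) PySem.Dict.empty then
    -- any(s[i] == s[i+2] …): indices produced by range are in bounds, so getElem? is exact here
    (List.range (l.length - 2)).any (fun i => l[i]? == l[i + 2]?)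
  else false

-- ===== PRECONDITION & SPEC =====
def Spec_newIsNiceOrNaughty (s : String) (out : Bool) : Prop := out = newIsNiceOrNaughty_alt s
instance (s : String) (out : Bool) : Decidable (Spec_newIsNiceOrNaughty s out) := by unfold Spec_newIsNiceOrNaughty; infer_instance

-- ===== CLAIM (what is proved, stated in full; the proofs are below) =====
def Claim_equal_newIsNiceOrNaughty : Prop := ∀ (s : String), Dom_newIsNiceOrNaughty s → Spec_newIsNiceOrNaughty s (newIsNiceOrNaughty s)

-- ===== LEMMAS AND PROOFS =====

-- shared characterisation: the pair of chars starting at index k, and "a non-overlapping repeated pair exists"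
def pvPairAt (l : List Char) (k : Nat) : List Char := (l.drop k).take 2

def pvP (l : List Char) : Prop :=
  ∃ a b : Nat, a + 2 ≤ b ∧ b + 2 ≤ l.length ∧ pvPairAt l a = pvPairAt l b

theorem pv_any_congr {α : Type} (xs : List α) (p q : α → Bool) (h : ∀ x ∈ xs, p x = q x) :
    xs.any p = xs.any q := by
  induction xs with
  | nil => rfl
  | cons x xs ih =>
    simp only [List.any_cons, h x (by simp), ih (fun y hy => h y (by simp [hy]))]

theorem pv_foldl_if_true {α : Type} (xs : List α) (q : α → Prop) [DecidablePred q] (b : Bool) :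
    xs.foldl (fun acc x => if q x then true else acc) b = (b || xs.any fun x => decide (q x)) := by
  induction xs generalizing b with
  | nil => simp
  | cons x xs ih =>
    simp only [List.foldl_cons, List.any_cons, ih]
    by_cases h : q x <;> simp [h]

theorem pv_foldl_or {α : Type} (xs : List α) (g : α → Bool) (b : Bool) :
    xs.foldl (fun acc x => acc || g x) b = (b || xs.any g) := by
  induction xs generalizing b with
  | nil => simp
  | cons x xs ih =>
    simp only [List.foldl_cons, List.any_cons, ih]
    cases b <;> simp

theorem pv_foldl_nested (xs : List Int) (f : Int → List Int) (q : Int → Int → Prop)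
    [∀ i j, Decidable (q i j)] (b : Bool) :
    xs.foldl (fun acc i => (f i).foldl (fun acc2 j => if q i j then true else acc2) acc) b
      = (b || xs.any fun i => (f i).any fun j => decide (q i j)) := by
  simp only [pv_foldl_if_true]
  rw [pv_foldl_or]

theorem pv_flagA_iff (l : List Char) :
    ((PySem.List.pyRange 0 ((l.length : Int) - 2) 1).any (fun i =>
      (PySem.List.pyRange (i + 2) (l.length : Int) 1).any (fun j =>
        decide (PySem.List.slice l (some i) (some (i + 2)) = PySem.List.slice l (some j) (some (j + 2)))))) = true
      ↔ pvP l := by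
  constructor
  · intro h
    rw [List.any_eq_true] at h
    obtain ⟨i, hi, h2⟩ := h
    rw [List.any_eq_true] at h2
    obtain ⟨j, hj, heq⟩ := h2
    rw [PySem.List.mem_pyRange_one] at hi hj
    rw [decide_eq_true_eq] at heq
    have h0i : (0:Int) ≤ i := hi.1
    have h0j : (0:Int) ≤ j := by omega
    rw [PySem.List.slice_toNat l h0i (by omega), PySem.List.slice_toNat l h0j (by omega)] at heq
    have hti : (i + 2).toNat - i.toNat = 2 := by omega
    have htj : (j + 2).toNat - j.toNat = 2 := by omega
    rw [hti, htj] at heq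
    refine ⟨i.toNat, j.toNat, by omega, ?_, heq⟩
    have hlen : ((l.drop i.toNat).take 2).length = 2 := by
      simp only [List.length_take, List.length_drop]
      omega
    have hlen2 : ((l.drop j.toNat).take 2).length = 2 := by rw [← heq]; exact hlen
    simp only [List.length_take, List.length_drop] at hlen2
    omega
  · rintro ⟨a, b, hab, hbl, heq⟩
    rw [List.any_eq_true]
    refine ⟨(a : Int), ?_, ?_⟩
    · rw [PySem.List.mem_pyRange_one]; omega
    · rw [List.any_eq_true]
      refine ⟨(b : Int), ?_, ?_⟩
      · rw [PySem.List.mem_pyRange_one]; omega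
      · rw [decide_eq_true_eq]
        rw [PySem.List.slice_toNat l (by omega) (by omega),
            PySem.List.slice_toNat l (by omega) (by omega)]
        have hta : ((a : Int) + 2).toNat - (a : Int).toNat = 2 := by omega
        have htb : ((b : Int) + 2).toNat - (b : Int).toNat = 2 := by omega
        rw [hta, htb]
        simpa [pvPairAt, Int.toNat_natCast] using heq

-- invariant for B's dict loop: the dict maps each pair to its first occurrence before i,
-- and no non-overlapping repeat ends before i
def pvFirstInv (l : List Char) (d : PySem.Dict (List Char) Nat) (i : Nat) : Prop :=
  ∀ p : List Char,
    (∀ f, d.get? p = some f → f < i ∧ pvPairAt l f = p ∧ ∀ g, g < f → pvPairAt l g ≠ p) ∧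
    (d.get? p = none → ∀ g, g < i → pvPairAt l g ≠ p)

def pvNoRep (l : List Char) (i : Nat) : Prop :=
  ∀ a b : Nat, a + 2 ≤ b → b < i → pvPairAt l a ≠ pvPairAt l b

theorem pv_scan_spec (l : List Char) (k : Nat) :
    ∀ (i : Nat) (d : PySem.Dict (List Char) Nat), pvFirstInv l d i → pvNoRep l i →
    (pvScan l (List.range' i k) d = true ↔
      ∃ a b : Nat, a + 2 ≤ b ∧ b < i + k ∧ pvPairAt l a = pvPairAt l b) := by
  induction k with
  | zero =>
    intro i d _ hnr
    simp only [List.range'_zero, pvScan]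
    constructor
    · intro h; exact absurd h (by simp)
    · rintro ⟨a, b, hab, hb, heq⟩
      exact absurd heq (hnr a b hab (by omega))
  | succ k ih =>
    intro i d hinv hnr
    rw [List.range'_succ]
    simp only [pvScan]
    split
    next f hd =>
      obtain ⟨hfi, hfp, hmin⟩ := (hinv _).1 f hd
      by_cases hf2 : f + 2 ≤ i
      · rw [if_pos hf2]
        constructor
        · intro _; exact ⟨f, i, hf2, by omega, hfp⟩
        · intro _; rfl
      · rw [if_neg hf2]
        rw [ih (i + 1) d ?_ ?_]
        · constructor
          · rintro ⟨a, b, h1, h2, h3⟩; exact ⟨a, b, h1, by omega, h3⟩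
          · rintro ⟨a, b, h1, h2, h3⟩; exact ⟨a, b, h1, by omega, h3⟩
        · intro p
          refine ⟨fun f' h' => ?_, fun h' g hg => ?_⟩
          · obtain ⟨h1, h2, h3⟩ := (hinv p).1 f' h'
            exact ⟨by omega, h2, h3⟩
          · rcases Nat.lt_succ_iff_lt_or_eq.mp hg with hg' | hg'
            · exact (hinv p).2 h' g hg'
            · subst hg'
              intro hcon
              have hcon' : (l.drop g).take 2 = p := hcon
              rw [hcon'] at hd
              rw [h'] at hd
              simp at hd
        · intro a b hab hb
          rcases Nat.lt_succ_iff_lt_or_eq.mp hb with hb' | hb'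
          · exact hnr a b hab hb'
          · subst hb'
            have hfi' : f + 1 = b := by omega
            exact fun hcon => hmin a (by omega) hcon
    next hd =>
      rw [ih (i + 1) (d.insert ((l.drop i).take 2) i) ?_ ?_]
      · constructor
        · rintro ⟨a, b, h1, h2, h3⟩; exact ⟨a, b, h1, by omega, h3⟩
        · rintro ⟨a, b, h1, h2, h3⟩; exact ⟨a, b, h1, by omega, h3⟩
      · intro p
        by_cases hp : p = (l.drop i).take 2
        · subst hp
          rw [PySem.Dict.get?_insert_self]
          refine ⟨fun f' h' => ?_, fun h' => ?_⟩
          · cases h'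
            exact ⟨by omega, rfl, fun g hg => (hinv _).2 hd g hg⟩
          · simp at h'
        · rw [PySem.Dict.get?_insert_of_ne d i hp]
          refine ⟨fun f' h' => ?_, fun h' g hg => ?_⟩
          · obtain ⟨h1, h2, h3⟩ := (hinv p).1 f' h'
            exact ⟨by omega, h2, h3⟩
          · rcases Nat.lt_succ_iff_lt_or_eq.mp hg with hg' | hg'
            · exact (hinv p).2 h' g hg'
            · subst hg'
              intro hcon
              exact hp hcon.symm
      · intro a b hab hb
        rcases Nat.lt_succ_iff_lt_or_eq.mp hb with hb' | hb'
        · exact hnr a b hab hb'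
        · subst hb'
          intro hcon
          exact (hinv _).2 hd a (by omega) hcon

theorem pv_scanB_iff (l : List Char) :
    pvScan l (List.range (l.length - 1)) PySem.Dict.empty = true ↔ pvP l := by
  rw [List.range_eq_range']
  rw [pv_scan_spec l (l.length - 1) 0 PySem.Dict.empty ?_ ?_]
  · constructor
    · rintro ⟨a, b, h1, h2, h3⟩; exact ⟨a, b, h1, by omega, h3⟩
    · rintro ⟨a, b, h1, h2, h3⟩; exact ⟨a, b, h1, by omega, h3⟩
  · intro p
    refine ⟨fun f h => ?_, fun _ g hg => by omega⟩
    rw [PySem.Dict.get?_empty] at h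
    simp at h
  · intro a b _ hb; omega

theorem pv_sandwich_eq_list (l : List Char) :
    ((PySem.List.pyRange 0 ((l.length : Int) - 2) 1).any (fun i =>
        PySem.List.pyGetD l i ' ' == PySem.List.pyGetD l (i + 2) ' '))
      = (List.range (l.length - 2)).any (fun i => l[i]? == l[i + 2]?) := by
  rw [PySem.List.pyRange_one, List.any_map]
  have ht : (((l.length : Int) - 2) - 0).toNat = l.length - 2 := by omega
  rw [ht]
  apply pv_any_congr
  intro k hk
  rw [List.mem_range] at hk
  simp only [Function.comp_apply, zero_add]
  have h1 : PySem.List.pyGetD l ((k : Int)) ' ' = l.getD k ' ' := PySem.List.pyGetD_natCast l k ' '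
  have h2 : PySem.List.pyGetD l ((k : Int) + 2) ' ' = l.getD (k + 2) ' ' := by
    have hc : ((k : Int) + 2) = ((k + 2 : Nat) : Int) := by push_cast; ring
    rw [hc]; exact PySem.List.pyGetD_natCast l (k + 2) ' '
  rw [h1, h2]
  have hk1 : k < l.length := by omega
  have hk2 : k + 2 < l.length := by omega
  rw [List.getD_eq_getElem l ' ' hk1, List.getD_eq_getElem l ' ' hk2,
      List.getElem?_eq_getElem hk1, List.getElem?_eq_getElem hk2]
  simp

theorem pv_sandwich_eq (s : String) :
    ((PySem.List.pyRange 0 ((s.length : Int) - 2) 1).any (fun i =>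
        PySem.List.pyGetD s.toList i ' ' == PySem.List.pyGetD s.toList (i + 2) ' '))
      = (List.range (s.length - 2)).any (fun i => s.toList[i]? == s.toList[i + 2]?) := by
  have h : s.length = s.toList.length := by simp
  rw [h]
  exact pv_sandwich_eq_list s.toList

-- ===== VERDICT (by name: the statement is the Claim_ definition above) =====
theorem newIsNiceOrNaughty_spec : Claim_equal_newIsNiceOrNaughty := by
  intro s _
  unfold Spec_newIsNiceOrNaughty
  show newIsNiceOrNaughty s = newIsNiceOrNaughty_alt s
  simp only [newIsNiceOrNaughty, newIsNiceOrNaughty_alt]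
  rw [pv_foldl_nested (PySem.List.pyRange 0 ((s.toList.length : Int) - 2) 1)
      (fun i => PySem.List.pyRange (i + 2) (s.toList.length : Int) 1)
      (fun i j => PySem.List.slice s.toList (some i) (some (i + 2))
                = PySem.List.slice s.toList (some j) (some (j + 2))) false]
  rw [Bool.false_or]
  cases hA : ((PySem.List.pyRange 0 ((s.toList.length : Int) - 2) 1).any (fun i =>
      (PySem.List.pyRange (i + 2) (s.toList.length : Int) 1).any (fun j =>
        decide (PySem.List.slice s.toList (some i) (some (i + 2)) = PySem.List.slice s.toList (some j) (some (j + 2)))))) with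
  | false =>
    cases hB : pvScan s.toList (List.range (s.toList.length - 1)) PySem.Dict.empty with
    | false => simp
    | true =>
      have hp := (pv_scanB_iff s.toList).mp hB
      rw [(pv_flagA_iff s.toList).mpr hp] at hA
      exact Bool.noConfusion hA
  | true =>
    have hp := (pv_flagA_iff s.toList).mp hA
    rw [(pv_scanB_iff s.toList).mpr hp]
    simp only [Bool.not_true, Bool.false_eq_true, if_false, if_true]
    exact pv_sandwich_eq s
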